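-- pv_equiv track=rewrite | github.com/New-Tech-Exclusive/VYL-Language | new-compiler/generics.py | parse_generic_type
-- ===== SOURCE A (Python) =====
-- from typing import Dict, Set, List, Optional, Tuple
--
-- def parse_generic_type(type_str: str) -> Tuple[str, List[str]]:
--     """Parse a generic type string into base name and type arguments.
--
--     Example: "List<int>" -> ("List", ["int"])
--              "Map<string, int>" -> ("Map", ["string", "int"])
--              "int" -> ("int", [])
--     """
--     if '<' not in type_str:
--         return (type_str, [])
--
--     lt_pos = type_str.index('<')
--     base_name = type_str[:lt_pos]
--
--     # Find matching >
--     depth = 0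
--     args_str = ""
--     for i, ch in enumerate(type_str[lt_pos:]):
--         if ch == '<':
--             depth += 1
--             if depth > 1:
--                 args_str += ch
--         elif ch == '>':
--             depth -= 1
--             if depth == 0:
--                 break
--             args_str += ch
--         elif depth >= 1:
--             args_str += ch
--
--     # Split by comma (but not nested commas)
--     args = []
--     current_arg = ""
--     depth = 0
--     for ch in args_str:
--         if ch == '<':
--             depth += 1
--             current_arg += ch
--         elif ch == '>':
--             depth -= 1
--             current_arg += ch
--         elif ch == ',' and depth == 0:
--             args.append(current_arg.strip())
--             current_arg = ""
--         else:
--             current_arg += ch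
--     if current_arg.strip():
--         args.append(current_arg.strip())
--
--     return (base_name, args)
-- ===== SOURCE B (Python) =====
-- def parse_generic_type(type_str):
--     """Single-pass parser: split off base name, then one depth-tracking scan
--     that emits arguments directly (no intermediate args_str)."""
--     if '<' not in type_str:
--         return (type_str, [])
--     lt = type_str.index('<')
--     base_name = type_str[:lt]
--     args = []
--     current = ""
--     depth = 0
--     for ch in type_str[lt:]:
--         if ch == '<':
--             depth += 1
--             if depth > 1:
--                 current += ch
--         elif ch == '>':
--             depth -= 1
--             if depth == 0:
--                 if current.strip():
--                     args.append(current.strip())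
--                 return (base_name, args)
--             current += ch
--         elif ch == ',' and depth == 1:
--             args.append(current.strip())
--             current = ""
--         elif depth >= 1:
--             current += ch
--     if current.strip():
--         args.append(current.strip())
--     return (base_name, args)
-- ===== Notes on version B (the rewrite author's own statement) =====
-- stated objective: simpler
-- what changed: A first collects the bracketed region into an intermediate args_str string and then runs a second depth-tracking loop to split it; B does one single depth-tracking pass over the remainder that emits stripped arguments directly and stops at the matching close bracket, never building args_str.
import Mathlib
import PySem

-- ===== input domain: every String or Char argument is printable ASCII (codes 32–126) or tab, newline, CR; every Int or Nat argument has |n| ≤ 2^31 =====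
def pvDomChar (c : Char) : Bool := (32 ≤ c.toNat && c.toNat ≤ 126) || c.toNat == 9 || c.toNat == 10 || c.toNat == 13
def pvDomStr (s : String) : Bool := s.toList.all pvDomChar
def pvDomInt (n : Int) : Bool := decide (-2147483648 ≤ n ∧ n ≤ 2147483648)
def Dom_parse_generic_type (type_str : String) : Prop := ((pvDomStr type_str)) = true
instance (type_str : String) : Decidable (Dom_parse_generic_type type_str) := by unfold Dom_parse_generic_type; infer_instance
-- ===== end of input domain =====

-- B replaces A's two sequential depth-tracking loops (collect args_str, then split it)
-- by one pass that emits the stripped arguments directly; same O(n) cost, simpler.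

-- ===== PORT A =====
-- A's first loop: collect args_str from type_str[lt_pos:] (break when depth returns to 0).
def aCollect : List Char → Int → List Char → List Char
  | [], _, acc => acc
  | c :: rest, depth, acc =>
    if c = '<' then
      aCollect rest (depth + 1) (if depth + 1 > 1 then acc ++ [c] else acc)
    else if c = '>' then
      if depth - 1 = 0 then acc else aCollect rest (depth - 1) (acc ++ [c])
    else if depth ≥ 1 then aCollect rest depth (acc ++ [c])
    else aCollect rest depth acc

-- A's second loop: split args_str by top-level commas; returns (args, current_arg).
def aSplit : List Char → Int → List Char → List String → List String × List Char
  | [], _, cur, args => (args, cur)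
  | c :: rest, depth, cur, args =>
    if c = '<' then aSplit rest (depth + 1) (cur ++ [c]) args
    else if c = '>' then aSplit rest (depth - 1) (cur ++ [c]) args
    else if c = ',' ∧ depth = 0 then aSplit rest depth [] (args ++ [String.ofList (PySem.Chars.strip cur)])
    else aSplit rest depth (cur ++ [c]) args

def parse_generic_type (type_str : String) : String × List String :=
  let cs := type_str.toList
  if PySem.Chars.isIn ['<'] cs = false then (type_str, [])
  else
    let lt : Int := PySem.Chars.find cs ['<']
    let base_name := String.ofList (PySem.Chars.slice cs none (some lt))
    let args_str := aCollect (PySem.Chars.slice cs (some lt) none) 0 []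
    let (args, cur) := aSplit args_str 0 [] []
    if PySem.Chars.strip cur ≠ [] then (base_name, args ++ [String.ofList (PySem.Chars.strip cur)])
    else (base_name, args)

-- ===== PORT B =====
-- B's single loop over type_str[lt_pos:]: one depth counter, emits arguments directly.
def bScan : List Char → Int → List Char → List String → List String
  | [], _, cur, args =>
    if PySem.Chars.strip cur ≠ [] then args ++ [String.ofList (PySem.Chars.strip cur)] else args
  | c :: rest, depth, cur, args =>
    if c = '<' then
      bScan rest (depth + 1) (if depth + 1 > 1 then cur ++ [c] else cur) args
    else if c = '>' then
      if depth - 1 = 0 then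
        if PySem.Chars.strip cur ≠ [] then args ++ [String.ofList (PySem.Chars.strip cur)] else args
      else bScan rest (depth - 1) (cur ++ [c]) args
    else if c = ',' ∧ depth = 1 then bScan rest depth [] (args ++ [String.ofList (PySem.Chars.strip cur)])
    else if depth ≥ 1 then bScan rest depth (cur ++ [c]) args
    else bScan rest depth cur args

def parse_generic_type_alt (type_str : String) : String × List String :=
  let cs := type_str.toList
  if PySem.Chars.isIn ['<'] cs = false then (type_str, [])
  else
    let lt : Int := PySem.Chars.find cs ['<']
    let base_name := String.ofList (PySem.Chars.slice cs none (some lt))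
    (base_name, bScan (PySem.Chars.slice cs (some lt) none) 0 [] [])

-- ===== PRECONDITION & SPEC =====
def Spec_parse_generic_type (type_str : String) (out : String × List String) : Prop := out = parse_generic_type_alt type_str
instance (type_str : String) (out : String × List String) : Decidable (Spec_parse_generic_type type_str out) := by unfold Spec_parse_generic_type; infer_instance

-- ===== CLAIM (what is proved, stated in full; the proofs are below) =====
def Claim_equal_parse_generic_type : Prop := ∀ (type_str : String), Dom_parse_generic_type type_str → Spec_parse_generic_type type_str (parse_generic_type type_str)

-- ===== LEMMAS AND PROOFS =====

def finishA (p : List String × List Char) : List String :=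
  if PySem.Chars.strip p.2 ≠ [] then p.1 ++ [String.ofList (PySem.Chars.strip p.2)] else p.1

theorem aCollect_acc (s : List Char) : ∀ (d : Int) (acc : List Char),
    aCollect s d acc = acc ++ aCollect s d [] := by
  induction s with
  | nil => intro d acc; simp [aCollect]
  | cons c rest ih =>
    intro d acc
    simp only [aCollect, List.nil_append]
    split_ifs <;>
      first
      | simp
      | exact ih _ _
      | (rw [ih _ (acc ++ [c]), ih _ [c]]; simp)

theorem main_lemma (s : List Char) : ∀ (d : Int) (cur : List Char) (args : List String),
    1 ≤ d → bScan s d cur args = finishA (aSplit (aCollect s d []) (d - 1) cur args) := by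
  induction s with
  | nil =>
    intro d cur args _
    simp only [bScan, aCollect, aSplit, finishA]
  | cons c rest ih =>
    intro d cur args hd
    by_cases hlt : c = '<'
    · subst hlt
      have h1 : (1:Int) < d + 1 := by omega
      simp only [bScan, aCollect, if_pos h1, List.nil_append, if_true]
      rw [aCollect_acc rest (d+1) ['<']]
      simp only [List.singleton_append, aSplit, if_true]
      rw [show (d:Int) - 1 + 1 = d + 1 - 1 from by omega]
      exact ih (d+1) (cur ++ ['<']) args (by omega)
    · by_cases hgt : c = '>'
      · subst hgt
        by_cases h0 : d - 1 = 0
        · simp only [bScan, aCollect, aSplit, finishA, if_pos h0, if_neg hlt, if_true]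
        · simp only [bScan, aCollect, if_neg hlt, if_neg h0, if_true, List.nil_append]
          rw [aCollect_acc rest (d-1) ['>']]
          simp only [List.singleton_append, aSplit, if_neg hlt, if_true]
          rw [show (d:Int) - 1 - 1 = d - 1 - 1 from rfl]
          exact ih (d-1) (cur ++ ['>']) args (by omega)
      · by_cases hc : c = ','
        · subst hc
          by_cases h1 : d = 1
          · subst h1
            simp only [bScan, aCollect, if_neg hlt, if_neg hgt, List.nil_append]
            norm_num
            rw [aCollect_acc rest 1 [',']]
            simp only [List.singleton_append, aSplit, if_neg hlt, if_neg hgt]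
            norm_num
            simpa using ih 1 [] (args ++ [String.ofList (PySem.Chars.strip cur)]) (by omega)
          · have hcm : ¬ (',' = ',' ∧ d = 1) := fun h => h1 h.2
            simp only [bScan, aCollect, if_neg hlt, if_neg hgt,
              if_pos (show d ≥ 1 from hd), List.nil_append, true_and, if_neg h1]
            rw [aCollect_acc rest d [',']]
            have hc2 : ¬ (',' = ',' ∧ d - 1 = 0) := fun h => h1 (by omega)
            simp only [List.singleton_append, aSplit, if_neg hlt, if_neg hgt,
              true_and, if_neg (show ¬ d - 1 = 0 from fun h => h1 (by omega))]
            exact ih d (cur ++ [',']) args hd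
        · have hcm : ¬ (c = ',' ∧ d = 1) := fun h => hc h.1
          simp only [bScan, aCollect, if_neg hlt, if_neg hgt, if_neg hcm,
            if_pos (show d ≥ 1 from hd), List.nil_append]
          rw [aCollect_acc rest d [c]]
          have hc2 : ¬ (c = ',' ∧ d - 1 = 0) := fun h => hc h.1
          simp only [List.singleton_append, aSplit, if_neg hlt, if_neg hgt, if_neg hc2]
          exact ih d (cur ++ [c]) args hd

-- ===== VERDICT (by name: the statement is the Claim_ definition above) =====
theorem parse_generic_type_spec : Claim_equal_parse_generic_type := by
  intro s _
  unfold Spec_parse_generic_type parse_generic_type parse_generic_type_alt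
  dsimp only
  by_cases h : PySem.Chars.isIn ['<'] s.toList = false
  · simp only [h, if_true]
  · have h' : PySem.Chars.isIn ['<'] s.toList = true := by simpa using h
    rw [if_neg (show ¬ (PySem.Chars.isIn ['<'] s.toList = false) by simp [h'])]
    have hfind : 0 ≤ PySem.Chars.find s.toList ['<'] := by
      rw [PySem.Chars.find_nonneg_iff, ← PySem.Chars.isIn_iff_infix]
      exact h'
    obtain ⟨hpre, -⟩ := PySem.Chars.find_spec (s := s.toList) (sub := ['<']) hfind
    rw [PySem.Chars.slice_eq_listSlice, PySem.List.slice_from _ hfind]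
    obtain ⟨rest, hrest⟩ := hpre
    rw [← hrest]
    simp only [List.singleton_append]
    have stepA : aCollect ('<' :: rest) 0 [] = aCollect rest 1 [] := by
      simp [aCollect]
    have stepB : bScan ('<' :: rest) 0 [] [] = bScan rest 1 [] [] := by
      simp [bScan]
    rw [stepA, stepB, main_lemma rest 1 [] [] (by omega)]
    norm_num [finishA]
    split <;> simp_all
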